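-- pv_equiv track=rewrite | github.com/joseph-birara/Job_portal-backed- | A_Saving_Humanity.py | evolve_soldiers
-- ===== SOURCE A (Python) =====
-- def evolve_soldiers(soldiers, m):
--     n = len(soldiers)
--     for _ in range(m):
--         new_soldiers = [0] * n
--         for i in range(n):
--             if soldiers[i] == 1:
--                 new_soldiers[i] = 1
--             else:
--                 live_neighbors = (
--                     soldiers[i-1] if i > 0 else 0) + (soldiers[i+1] if i < n-1 else 0)
--                 if live_neighbors == 1:
--                     new_soldiers[i] = 1
--         soldiers = new_soldiers
--     return ''.join(str(s) for s in soldiers)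
-- ===== SOURCE B (Python) =====
-- def evolve_soldiers(soldiers, m):
--     # O(n) closed form: after the first exact step the state is 0/1 and a cell
--     # turns on at step min(dL,dR) iff dL != dR (nearest-1 distances), so no
--     # step-by-step simulation is needed.
--     n = len(soldiers)
--     if m <= 0:
--         return ''.join(str(s) for s in soldiers)
--     left = [0] + soldiers[:-1]
--     right = soldiers[1:] + [0]
--     s1 = [1 if c == 1 or l + r == 1 else 0 for l, c, r in zip(left, soldiers, right)]
--     INF = n + 1
--     dL = [0] * n
--     dR = [0] * n
--     d = INF
--     for i in range(n):
--         d = 0 if s1[i] == 1 else min(d + 1, INF)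
--         dL[i] = d
--     d = INF
--     for i in range(n - 1, -1, -1):
--         d = 0 if s1[i] == 1 else min(d + 1, INF)
--         dR[i] = d
--     t = m - 1
--     out = []
--     for i in range(n):
--         on = s1[i] == 1 or (min(dL[i], dR[i]) <= t and dL[i] != dR[i])
--         out.append('1' if on else '0')
--     return ''.join(out)
-- ===== Notes on version B (the rewrite author's own statement) =====
-- stated objective: faster
-- what changed: Replaces the m-round simulation by a closed form: one exact first step, then two O(n) scans computing nearest-1 distances left and right; a cell ends up on iff it is on after the first step or min(dL,dR) <= m-1 with dL != dR.
import Mathlib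
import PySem

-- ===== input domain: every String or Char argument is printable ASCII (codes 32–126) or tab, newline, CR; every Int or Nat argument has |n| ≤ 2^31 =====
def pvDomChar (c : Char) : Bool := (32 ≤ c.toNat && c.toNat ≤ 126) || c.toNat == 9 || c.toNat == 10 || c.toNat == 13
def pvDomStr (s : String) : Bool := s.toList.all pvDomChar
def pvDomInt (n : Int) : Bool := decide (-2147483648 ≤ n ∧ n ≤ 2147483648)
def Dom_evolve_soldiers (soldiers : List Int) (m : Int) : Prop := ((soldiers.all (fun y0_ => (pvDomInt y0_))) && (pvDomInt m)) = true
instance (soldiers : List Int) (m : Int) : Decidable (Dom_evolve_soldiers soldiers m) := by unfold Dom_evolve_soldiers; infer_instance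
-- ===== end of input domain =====

-- B replaces A's m-round simulation by a closed form (first step + nearest-1 distance scans); objective: faster.


-- ===== PORT A =====
-- literal transliteration of A: m rounds, each round rebuilds the list by the
-- neighbor rule ('new[i]=1 if soldiers[i]==1 else 1 if live_neighbors==1 else 0'),
-- then str-join.  All index accesses are guarded in range, so pyGetD is exact.
def evolve_soldiers (soldiers : List Int) (m : Int) : String :=
  let n : Int := soldiers.length
  let final := (PySem.List.pyRange 0 m 1).foldl (fun s _ =>
    (PySem.List.pyRange 0 n 1).map (fun i =>
      if PySem.List.pyGetD s i 0 = 1 then (1 : Int)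
      else if ((if i > 0 then PySem.List.pyGetD s (i - 1) 0 else 0) +
               (if i < n - 1 then PySem.List.pyGetD s (i + 1) 0 else 0)) = 1 then 1
      else 0)) soldiers
  PySem.Str.join "" (final.map PySem.Int.toStr)

-- ===== PORT B =====
-- literal transliteration of Source B: first step via zipped shifted lists, then the
-- two distance scans (forward fold appending, backward fold consing), then the
-- closed-form test min(dL,dR) ≤ m-1 ∧ dL ≠ dR.
def evolve_soldiers_alt (soldiers : List Int) (m : Int) : String :=
  let n : Int := soldiers.length
  if m ≤ 0 then PySem.Str.join "" (soldiers.map PySem.Int.toStr)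
  else
    let left := 0 :: PySem.List.slice soldiers none (some (-1))
    let right := PySem.List.slice soldiers (some 1) none ++ [0]
    let s1 := (left.zip (soldiers.zip right)).map (fun p =>
      if p.2.1 = 1 ∨ p.1 + p.2.2 = 1 then (1 : Int) else 0)
    let INF : Int := n + 1
    let dL := (s1.foldl (fun (acc : List Int × Int) x =>
      let d := if x = 1 then 0 else min (acc.2 + 1) INF
      (acc.1 ++ [d], d)) ([], INF)).1
    let dR := (s1.reverse.foldl (fun (acc : List Int × Int) x =>
      let d := if x = 1 then 0 else min (acc.2 + 1) INF
      (d :: acc.1, d)) ([], INF)).1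
    let t := m - 1
    let out := (s1.zip (dL.zip dR)).map (fun p =>
      if p.1 = 1 ∨ (min p.2.1 p.2.2 ≤ t ∧ p.2.1 ≠ p.2.2) then "1" else "0")
    PySem.Str.join "" out

-- ===== PRECONDITION & SPEC =====
def Spec_evolve_soldiers (soldiers : List Int) (m : Int) (out : String) : Prop := out = evolve_soldiers_alt soldiers m
instance (soldiers : List Int) (m : Int) (out : String) : Decidable (Spec_evolve_soldiers soldiers m out) := by unfold Spec_evolve_soldiers; infer_instance

-- ===== CLAIM (what is proved, stated in full; the proofs are below) =====
def Claim_equal_evolve_soldiers : Prop := ∀ (soldiers : List Int) (m : Int), Dom_evolve_soldiers soldiers m → Spec_evolve_soldiers soldiers m (evolve_soldiers soldiers m)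

-- ===== LEMMAS AND PROOFS =====

def pvDF : List Int → Option Nat
  | [] => none
  | x :: xs => if x = 1 then some 0 else (pvDF xs).map (· + 1)

def pvDL (s : List Int) (i : Nat) : Option Nat := pvDF ((s.take (i + 1)).reverse)
def pvDR (s : List Int) (i : Nat) : Option Nat := pvDF (s.drop i)

theorem pvDF_lt_length {l : List Int} {a : Nat} (h : pvDF l = some a) : a < l.length := by
  induction l generalizing a with
  | nil => simp [pvDF] at h
  | cons x xs ih =>
    simp only [pvDF] at h
    split_ifs at h with hx
    · simp at h; simp only [List.length_cons]; omega
    · cases hdf : pvDF xs with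
      | none => rw [hdf] at h; simp at h
      | some b =>
        rw [hdf] at h
        have hb := ih hdf
        simp only [Option.map_some] at h
        injection h with h
        simp only [List.length_cons]
        omega

theorem pvDF_append_singleton (ys : List Int) (x : Int) :
    pvDF (ys ++ [x]) = match pvDF ys with
      | some a => some a
      | none => if x = 1 then some ys.length else none := by
  induction ys with
  | nil => simp [pvDF]
  | cons y ys ih =>
    cases hdf : pvDF ys with
    | none =>
      simp only [List.cons_append, pvDF, ih, hdf, List.length_cons]
      split_ifs <;> simp
    | some a =>
      simp only [List.cons_append, pvDF, ih, hdf, List.length_cons]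
      split_ifs <;> simp

theorem pvTake_succ_reverse (s : List Int) (i : Nat) (hi : i < s.length) :
    (s.take (i + 1)).reverse = s.getD i 0 :: (s.take i).reverse := by
  have h : s.take (i + 1) = s.take i ++ [s.getD i 0] := by
    rw [List.take_add_one]
    simp [List.getElem?_eq_getElem hi]
  rw [h]
  simp

theorem pvDL_zero (s : List Int) (h : 0 < s.length) :
    pvDL s 0 = if s.getD 0 0 = 1 then some 0 else none := by
  unfold pvDL
  rw [pvTake_succ_reverse s 0 h]
  simp [pvDF]

theorem pvDL_succ (s : List Int) (i : Nat) (hi : i + 1 < s.length) :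
    pvDL s (i + 1) = if s.getD (i + 1) 0 = 1 then some 0 else (pvDL s i).map (· + 1) := by
  unfold pvDL
  rw [pvTake_succ_reverse s (i + 1) hi]
  simp [pvDF]

theorem pvDR_eq (s : List Int) (i : Nat) (hi : i < s.length) :
    pvDR s i = if s.getD i 0 = 1 then some 0 else (pvDR s (i + 1)).map (· + 1) := by
  unfold pvDR
  rw [List.drop_eq_getElem_cons hi]
  simp [pvDF, List.getD_eq_getElem _ _ hi, List.getElem?_eq_getElem hi]

def pvOn (s : List Int) (t i : Nat) : Bool :=
  match pvDL s i, pvDR s i with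
  | none, none => false
  | some a, none => decide (a ≤ t)
  | none, some b => decide (b ≤ t)
  | some a, some b => decide (a = 0 ∨ (a ≠ b ∧ min a b ≤ t))

theorem pvDL_eq_zero_iff (s : List Int) (i : Nat) (hi : i < s.length) :
    pvDL s i = some 0 ↔ s.getD i 0 = 1 := by
  unfold pvDL
  rw [pvTake_succ_reverse s i hi]
  simp only [pvDF]
  split_ifs with h
  · simpa using h
  · simp only [h, iff_false]
    cases pvDF ((s.take i).reverse) <;> simp

theorem pvDR_eq_zero_iff (s : List Int) (i : Nat) (hi : i < s.length) :
    pvDR s i = some 0 ↔ s.getD i 0 = 1 := by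
  rw [pvDR_eq s i hi]
  split_ifs with h
  · simpa using h
  · simp only [h, iff_false]
    cases pvDR s (i + 1) <;> simp

theorem pvDL_le (s : List Int) (i : Nat) {a : Nat} (h : pvDL s i = some a) : a ≤ i := by
  have := pvDF_lt_length h
  simp only [List.length_reverse, List.length_take] at this
  omega

theorem pvDR_lt (s : List Int) (i : Nat) {b : Nat} (h : pvDR s i = some b) : i + b < s.length := by
  have := pvDF_lt_length h
  simp only [List.length_drop] at this
  omega

theorem pvOn_of_one (s : List Int) (t i : Nat) (hi : i < s.length) (h : s.getD i 0 = 1) :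
    pvOn s t i = true := by
  have h1 : pvDL s i = some 0 := (pvDL_eq_zero_iff s i hi).mpr h
  have h2 : pvDR s i = some 0 := (pvDR_eq_zero_iff s i hi).mpr h
  simp [pvOn, h1, h2]

def pvStep (s : List Int) : List Int :=
  (List.range s.length).map (fun i =>
    if s.getD i 0 = 1 then (1 : Int)
    else if ((if i = 0 then 0 else s.getD (i - 1) 0) + s.getD (i + 1) 0) = 1 then 1
    else 0)

theorem pvStep_getD (s : List Int) (i : Nat) (hi : i < s.length) :
    (pvStep s).getD i 0 =
      (if s.getD i 0 = 1 then (1 : Int)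
       else if ((if i = 0 then 0 else s.getD (i - 1) 0) + s.getD (i + 1) 0) = 1 then 1
       else 0) := by
  have hl : i < (pvStep s).length := by simpa [pvStep] using hi
  rw [List.getD_eq_getElem _ _ hl]
  simp [pvStep]

theorem pvStep_length (s : List Int) : (pvStep s).length = s.length := by
  simp [pvStep]

theorem pvStep_binary (s : List Int) : ∀ x ∈ pvStep s, x = 0 ∨ x = 1 := by
  intro x hx
  simp only [pvStep, List.mem_map, List.mem_range] at hx
  obtain ⟨i, _, h⟩ := hx
  split_ifs at h <;> omega

def pvScan (N : Int) : Int → List Int → List Int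
  | _, [] => []
  | d, x :: xs => (if x = 1 then 0 else min (d + 1) N) :: pvScan N (if x = 1 then 0 else min (d + 1) N) xs

theorem pvScan_getD (N : Int) (l : List Int) (d : Int) (i : Nat)
    (hd : 0 ≤ d) (hi : i < l.length) (hN : (i : Int) + 1 ≤ N) :
    (pvScan N d l).getD i 0 = match pvDF ((l.take (i + 1)).reverse) with
      | some a => (a : Int)
      | none => min (d + i + 1) N := by
  induction l generalizing d i with
  | nil => simp at hi
  | cons x xs ih =>
    cases i with
    | zero =>
      simp only [pvScan, List.getD_cons_zero, List.take, List.reverse_cons, List.reverse_nil,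
        List.nil_append, pvDF]
      split_ifs with hx
      · rfl
      · cases h : pvDF ([] : List Int) <;> simp [pvDF] at h ⊢ <;> omega
    | succ i =>
      have hi' : i < xs.length := by simpa using hi
      have hN' : (i : Int) + 1 ≤ N := by push_cast at hN ⊢; omega
      simp only [pvScan, List.getD_cons_succ]
      by_cases hx : x = 1
      · rw [if_pos hx, ih 0 i le_rfl hi' hN']
        have htk : ((x :: xs).take (i + 1 + 1)).reverse = (xs.take (i + 1)).reverse ++ [x] := by
          simp
        rw [htk, pvDF_append_singleton]
        cases h : pvDF ((xs.take (i + 1)).reverse) with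
        | some a => simp
        | none =>
          have hlen : ((xs.take (i + 1)).reverse).length = i + 1 := by
            simp; omega
          have hNN : (i : Int) + 2 ≤ N := by push_cast at hN; omega
          simp only [if_pos hx, hlen]
          clear ih h htk hN
          push_cast
          rw [min_eq_left (by omega)]
          ring
      · have hd' : 0 ≤ min (d + 1) N := by
          have : (0:Int) ≤ (i:Int) + 1 + 1 := by positivity
          omega
        rw [if_neg hx, ih (min (d + 1) N) i hd' hi' hN']
        have htk : ((x :: xs).take (i + 1 + 1)).reverse = (xs.take (i + 1)).reverse ++ [x] := by
          simp
        rw [htk, pvDF_append_singleton]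
        cases h : pvDF ((xs.take (i + 1)).reverse) with
        | some a => simp
        | none =>
          have hNN : (i : Int) + 2 ≤ N := by push_cast at hN; omega
          simp only [if_neg hx]
          clear ih h htk hN
          push_cast
          by_cases hc : d + 1 ≤ N
          · rw [min_eq_left hc]
            by_cases hc2 : d + (1:Int) + ((i:Int) + 1) ≤ N
            · rw [min_eq_left (by omega), min_eq_left (by omega)]
              ring
            · rw [min_eq_right (by omega), min_eq_right (by omega)]
          · rw [min_eq_right (by omega), min_eq_right (by omega)]

theorem pvOn_succ (s : List Int) (t i : Nat) (hi : i < s.length) :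
    pvOn s (t + 1) i = true ↔ (pvOn s t i = true ∨
      ((if i = 0 then (0 : Int) else if pvOn s t (i - 1) then 1 else 0) +
       (if i + 1 < s.length then (if pvOn s t (i + 1) then (1 : Int) else 0) else 0) = 1)) := by
  by_cases hone : s.getD i 0 = 1
  · simp [pvOn_of_one s (t + 1) i hi hone, pvOn_of_one s t i hi hone]
  · cases i with
    | zero =>
      have hdl : pvDL s 0 = none := by rw [pvDL_zero s hi, if_neg hone]
      have hmr := pvDR_eq s 0 hi
      rw [if_neg hone] at hmr
      cases hdr : pvDR s 0 with
      | none =>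
        rw [hdr] at hmr
        have hr1 : pvDR s 1 = none := by
          cases h : pvDR s 1 <;> rw [h] at hmr <;> simp_all
        by_cases h2 : 0 + 1 < s.length
        · have hs1 : ¬ s.getD 1 0 = 1 := by
            intro h
            rw [(pvDR_eq_zero_iff s 1 h2).mpr h] at hr1; simp at hr1
          have hdl1 : pvDL s 1 = none := by
            rw [pvDL_succ s 0 h2, if_neg hs1, hdl]; rfl
          simp [pvOn, hdl, hdr, hdl1, hr1, h2]
        · simp [pvOn, hdl, hdr, h2]
      | some b =>
        rw [hdr] at hmr
        obtain ⟨b', hr1, hb⟩ : ∃ b', pvDR s 1 = some b' ∧ b = b' + 1 := by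
          cases h : pvDR s 1 <;> rw [h] at hmr <;> simp_all
        have h2 : 0 + 1 < s.length := by
          have := pvDR_lt s 0 hdr; omega
        by_cases hb0 : b' = 0
        · have hs1 : s.getD 1 0 = 1 := (pvDR_eq_zero_iff s 1 h2).mp (by rw [hr1, hb0])
          have hdl1 : pvDL s 1 = some 0 := (pvDL_eq_zero_iff s 1 h2).mpr hs1
          simp only [pvOn, hdl, hdr, hdl1, hr1, if_pos h2, hb, hb0]
          split_ifs <;> simp_all <;> omega
        · have hs1 : ¬ s.getD 1 0 = 1 := by
            intro h
            rw [(pvDR_eq_zero_iff s 1 h2).mpr h] at hr1; simp_all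
          have hdl1 : pvDL s 1 = none := by
            rw [pvDL_succ s 0 h2, if_neg hs1, hdl]; rfl
          simp only [pvOn, hdl, hdr, hdl1, hr1, if_pos h2, hb]
          split_ifs <;> simp_all <;> omega
    | succ j =>
      have hj : j < s.length := by omega
      have hml := pvDL_succ s j hi
      rw [if_neg hone] at hml
      have hmr := pvDR_eq s (j + 1) hi
      rw [if_neg hone] at hmr
      cases hdl : pvDL s (j + 1) with
      | none =>
        rw [hdl] at hml
        have hlj : pvDL s j = none := by
          cases h : pvDL s j <;> rw [h] at hml <;> simp_all
        have hsj : ¬ s.getD j 0 = 1 := by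
          intro h
          rw [(pvDL_eq_zero_iff s j hj).mpr h] at hlj; simp at hlj
        cases hdr : pvDR s (j + 1) with
        | none =>
          rw [hdr] at hmr
          have hr1 : pvDR s (j + 1 + 1) = none := by
            cases h : pvDR s (j + 1 + 1) <;> rw [h] at hmr <;> simp_all
          have hrj : pvDR s j = none := by
            rw [pvDR_eq s j hj, if_neg hsj, hdr]; rfl
          by_cases h2 : j + 1 + 1 < s.length
          · have hs1 : ¬ s.getD (j + 1 + 1) 0 = 1 := by
              intro h
              rw [(pvDR_eq_zero_iff s _ h2).mpr h] at hr1; simp at hr1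
            have hdl1 : pvDL s (j + 1 + 1) = none := by
              rw [pvDL_succ s (j + 1) h2, if_neg hs1, hdl]; rfl
            simp [pvOn, hdl, hdr, hlj, hrj, hdl1, hr1, h2]
          · simp [pvOn, hdl, hdr, hlj, hrj, h2]
        | some b =>
          rw [hdr] at hmr
          obtain ⟨b', hr1, hb⟩ : ∃ b', pvDR s (j + 1 + 1) = some b' ∧ b = b' + 1 := by
            cases h : pvDR s (j + 1 + 1) <;> rw [h] at hmr <;> simp_all
          have hrj : pvDR s j = some (b + 1) := by
            rw [pvDR_eq s j hj, if_neg hsj, hdr]; rfl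
          have h2 : j + 1 + 1 < s.length := by
            have := pvDR_lt s (j + 1) hdr; omega
          by_cases hb0 : b' = 0
          · have hs1 : s.getD (j + 1 + 1) 0 = 1 :=
              (pvDR_eq_zero_iff s _ h2).mp (by rw [hr1, hb0])
            have hdl1 : pvDL s (j + 1 + 1) = some 0 := (pvDL_eq_zero_iff s _ h2).mpr hs1
            simp only [pvOn, hdl, hdr, hlj, hrj, hdl1, hr1, if_pos h2, hb, hb0]
            split_ifs <;> simp_all <;> omega
          · have hs1 : ¬ s.getD (j + 1 + 1) 0 = 1 := by
              intro h
              rw [(pvDR_eq_zero_iff s _ h2).mpr h] at hr1; simp_all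
            have hdl1 : pvDL s (j + 1 + 1) = none := by
              rw [pvDL_succ s (j + 1) h2, if_neg hs1, hdl]; rfl
            simp only [pvOn, hdl, hdr, hlj, hrj, hdl1, hr1, if_pos h2, hb]
            split_ifs <;> simp_all <;> omega
      | some a =>
        rw [hdl] at hml
        obtain ⟨a', hl1, ha⟩ : ∃ a', pvDL s j = some a' ∧ a = a' + 1 := by
          cases h : pvDL s j <;> rw [h] at hml <;> simp_all
        cases hdr : pvDR s (j + 1) with
        | none =>
          rw [hdr] at hmr
          have hr1 : pvDR s (j + 1 + 1) = none := by
            cases h : pvDR s (j + 1 + 1) <;> rw [h] at hmr <;> simp_all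
          by_cases ha0 : a' = 0
          · have hsj : s.getD j 0 = 1 := (pvDL_eq_zero_iff s j hj).mp (by rw [hl1, ha0])
            have hrj : pvDR s j = some 0 := (pvDR_eq_zero_iff s j hj).mpr hsj
            have hlj : pvDL s j = some 0 := by rw [hl1, ha0]
            by_cases h2 : j + 1 + 1 < s.length
            · have hs1 : ¬ s.getD (j + 1 + 1) 0 = 1 := by
                intro h
                rw [(pvDR_eq_zero_iff s _ h2).mpr h] at hr1; simp at hr1
              have hdl1 : pvDL s (j + 1 + 1) = some (a + 1) := by
                rw [pvDL_succ s (j + 1) h2, if_neg hs1, hdl]; rfl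
              simp only [pvOn, hdl, hdr, hlj, hrj, hdl1, hr1, if_pos h2, ha, ha0]
              split_ifs <;> simp_all <;> omega
            · simp only [pvOn, hdl, hdr, hlj, hrj, if_neg h2, ha, ha0]
              split_ifs <;> simp_all <;> omega
          · have hsj : ¬ s.getD j 0 = 1 := by
              intro h
              rw [(pvDL_eq_zero_iff s j hj).mpr h] at hl1; simp_all
            have hrj : pvDR s j = none := by
              rw [pvDR_eq s j hj, if_neg hsj, hdr]; rfl
            by_cases h2 : j + 1 + 1 < s.length
            · have hs1 : ¬ s.getD (j + 1 + 1) 0 = 1 := by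
                intro h
                rw [(pvDR_eq_zero_iff s _ h2).mpr h] at hr1; simp at hr1
              have hdl1 : pvDL s (j + 1 + 1) = some (a + 1) := by
                rw [pvDL_succ s (j + 1) h2, if_neg hs1, hdl]; rfl
              simp only [pvOn, hdl, hdr, hl1, hrj, hdl1, hr1, if_pos h2, ha]
              split_ifs <;> simp_all <;> omega
            · simp only [pvOn, hdl, hdr, hl1, hrj, if_neg h2, ha]
              split_ifs <;> simp_all <;> omega
        | some b =>
          rw [hdr] at hmr
          obtain ⟨b', hr1, hb⟩ : ∃ b', pvDR s (j + 1 + 1) = some b' ∧ b = b' + 1 := by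
            cases h : pvDR s (j + 1 + 1) <;> rw [h] at hmr <;> simp_all
          have h2 : j + 1 + 1 < s.length := by
            have := pvDR_lt s (j + 1) hdr; omega
          by_cases ha0 : a' = 0
          · have hsj : s.getD j 0 = 1 := (pvDL_eq_zero_iff s j hj).mp (by rw [hl1, ha0])
            have hrj : pvDR s j = some 0 := (pvDR_eq_zero_iff s j hj).mpr hsj
            have hlj : pvDL s j = some 0 := by rw [hl1, ha0]
            by_cases hb0 : b' = 0
            · have hs1 : s.getD (j + 1 + 1) 0 = 1 :=
                (pvDR_eq_zero_iff s _ h2).mp (by rw [hr1, hb0])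
              have hdl1 : pvDL s (j + 1 + 1) = some 0 := (pvDL_eq_zero_iff s _ h2).mpr hs1
              simp only [pvOn, hdl, hdr, hlj, hrj, hdl1, hr1, if_pos h2, ha, hb, ha0, hb0]
              split_ifs <;> simp_all <;> omega
            · have hs1 : ¬ s.getD (j + 1 + 1) 0 = 1 := by
                intro h
                rw [(pvDR_eq_zero_iff s _ h2).mpr h] at hr1; simp_all
              have hdl1 : pvDL s (j + 1 + 1) = some (a + 1) := by
                rw [pvDL_succ s (j + 1) h2, if_neg hs1, hdl]; rfl
              simp only [pvOn, hdl, hdr, hlj, hrj, hdl1, hr1, if_pos h2, ha, ha0]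
              split_ifs <;> simp_all <;> omega
          · have hsj : ¬ s.getD j 0 = 1 := by
              intro h
              rw [(pvDL_eq_zero_iff s j hj).mpr h] at hl1; simp_all
            have hrj : pvDR s j = some (b + 1) := by
              rw [pvDR_eq s j hj, if_neg hsj, hdr]; rfl
            by_cases hb0 : b' = 0
            · have hs1 : s.getD (j + 1 + 1) 0 = 1 :=
                (pvDR_eq_zero_iff s _ h2).mp (by rw [hr1, hb0])
              have hdl1 : pvDL s (j + 1 + 1) = some 0 := (pvDL_eq_zero_iff s _ h2).mpr hs1
              simp only [pvOn, hdl, hdr, hl1, hrj, hdl1, hr1, if_pos h2, ha, hb, hb0]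
              split_ifs <;> simp_all <;> omega
            · have hs1 : ¬ s.getD (j + 1 + 1) 0 = 1 := by
                intro h
                rw [(pvDR_eq_zero_iff s _ h2).mpr h] at hr1; simp_all
              have hdl1 : pvDL s (j + 1 + 1) = some (a + 1) := by
                rw [pvDL_succ s (j + 1) h2, if_neg hs1, hdl]; rfl
              simp only [pvOn, hdl, hdr, hl1, hrj, hdl1, hr1, if_pos h2, ha, hb]
              split_ifs <;> simp_all <;> omega

theorem pvIter_length (t : Nat) (s : List Int) : (pvStep^[t] s).length = s.length := by
  induction t generalizing s with
  | zero => rfl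
  | succ t ih => rw [Function.iterate_succ_apply, ih]; simp [pvStep]

theorem pvIter_getD (t : Nat) (s : List Int) (hb : ∀ x ∈ s, x = 0 ∨ x = 1) :
    ∀ i, i < s.length → (pvStep^[t] s).getD i 0 = if pvOn s t i then 1 else 0 := by
  induction t with
  | zero =>
    intro i hi
    simp only [Function.iterate_zero, id]
    by_cases h : s.getD i 0 = 1
    · rw [pvOn_of_one s 0 i hi h]; simpa using h
    · have h0 : s.getD i 0 = 0 := by
        have hmem : s.getD i 0 ∈ s := by
          rw [List.getD_eq_getElem _ _ hi]; exact List.getElem_mem hi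
        rcases hb _ hmem with h' | h'
        · exact h'
        · exact absurd h' h
      have hl0 : pvDL s i ≠ some 0 := fun hc => h ((pvDL_eq_zero_iff s i hi).mp hc)
      have hr0 : pvDR s i ≠ some 0 := fun hc => h ((pvDR_eq_zero_iff s i hi).mp hc)
      rw [h0]
      cases hdl : pvDL s i with
      | none =>
        cases hdr : pvDR s i with
        | none => simp [pvOn, hdl, hdr]
        | some b =>
          have hbne : b ≠ 0 := fun hc => hr0 (by rw [hdr, hc])
          simp [pvOn, hdl, hdr]; omega
      | some a =>
        have hane : a ≠ 0 := fun hc => hl0 (by rw [hdl, hc])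
        cases hdr : pvDR s i with
        | none => simp [pvOn, hdl, hdr]; omega
        | some b =>
          have hbne : b ≠ 0 := fun hc => hr0 (by rw [hdr, hc])
          simp [pvOn, hdl, hdr]
          omega
  | succ t ih =>
    intro i hi
    rw [Function.iterate_succ_apply']
    have hlen : (pvStep^[t] s).length = s.length := pvIter_length t s
    rw [pvStep_getD (pvStep^[t] s) i (by omega)]
    rw [ih i hi]
    have hL : (if i = 0 then (0 : Int) else (pvStep^[t] s).getD (i - 1) 0) =
        (if i = 0 then (0 : Int) else if pvOn s t (i - 1) then 1 else 0) := by
      by_cases hz : i = 0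
      · simp [hz]
      · rw [if_neg hz, if_neg hz, ih (i - 1) (by omega)]
    have hR : (pvStep^[t] s).getD (i + 1) 0 =
        (if i + 1 < s.length then (if pvOn s t (i + 1) then (1 : Int) else 0) else 0) := by
      by_cases h2 : i + 1 < s.length
      · rw [if_pos h2, ih (i + 1) h2]
      · rw [if_neg h2, List.getD_eq_default]
        omega
    rw [hL, hR]
    have hiff := pvOn_succ s t i hi
    cases hP : pvOn s (t + 1) i with
    | true =>
      rw [hP] at hiff
      simp only [if_pos rfl]
      rcases hiff.mp rfl with hQ | hsum
      · rw [hQ]; simp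
      · cases hQ : pvOn s t i with
        | true => simp
        | false => simp only [Bool.false_eq_true, if_false]; rw [if_neg (by norm_num), if_pos hsum]; simp
    | false =>
      rw [hP] at hiff
      have hQ : pvOn s t i = false := by
        cases hq : pvOn s t i
        · rfl
        · exact absurd (hiff.mpr (Or.inl hq)) (by simp)
      have hsum : ¬ ((if i = 0 then (0 : Int) else if pvOn s t (i - 1) then 1 else 0) +
          (if i + 1 < s.length then (if pvOn s t (i + 1) then (1 : Int) else 0) else 0) = 1) := by
        intro hc
        exact absurd (hiff.mpr (Or.inr hc)) (by simp)
      rw [hQ]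
      simp only [Bool.false_eq_true, if_false]
      rw [if_neg (by norm_num), if_neg hsum]

theorem pvStepA_eq (n : Int) (s : List Int) (hn : n = s.length) :
    ((PySem.List.pyRange 0 n 1).map (fun i =>
      if PySem.List.pyGetD s i 0 = 1 then (1 : Int)
      else if ((if i > 0 then PySem.List.pyGetD s (i - 1) 0 else 0) +
               (if i < n - 1 then PySem.List.pyGetD s (i + 1) 0 else 0)) = 1 then 1
      else 0)) = pvStep s := by
  subst hn
  rw [PySem.List.pyRange_one]
  simp only [Int.sub_zero, Int.toNat_natCast, List.map_map]
  unfold pvStep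
  apply List.map_congr_left
  intro k hk
  have hk' : k < s.length := List.mem_range.mp hk
  simp only [Function.comp_apply, Int.zero_add]
  rw [PySem.List.pyGetD_natCast]
  have hL : (if ((k : Int) > 0) then PySem.List.pyGetD s ((k : Int) - 1) 0 else 0) =
      (if k = 0 then (0 : Int) else s.getD (k - 1) 0) := by
    by_cases hz : k = 0
    · subst hz; norm_num
    · rw [if_pos (by exact_mod_cast Nat.pos_of_ne_zero hz), if_neg hz]
      have hcast : ((k : Int) - 1) = ((k - 1 : Nat) : Int) := by omega
      rw [hcast, PySem.List.pyGetD_natCast]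
  have hR : (if ((k : Int) < (s.length : Int) - 1) then PySem.List.pyGetD s ((k : Int) + 1) 0 else 0) =
      s.getD (k + 1) 0 := by
    by_cases h2 : k + 1 < s.length
    · rw [if_pos (by omega)]
      have hcast : ((k : Int) + 1) = ((k + 1 : Nat) : Int) := by omega
      rw [hcast, PySem.List.pyGetD_natCast]
    · rw [if_neg (by omega), List.getD_eq_default _ _ (by omega)]
  rw [hL, hR]

theorem pvS1_eq (s : List Int) :
    (((0 :: PySem.List.slice s none (some (-1))).zip (s.zip (PySem.List.slice s (some 1) none ++ [0]))).map
      (fun p => if p.2.1 = 1 ∨ p.1 + p.2.2 = 1 then (1 : Int) else 0)) = pvStep s := by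
  rw [PySem.List.slice_to_neg_one, PySem.List.slice_from_one]
  apply List.ext_getElem
  · simp [pvStep]
    omega
  · intro i h1 h2
    have hi : i < s.length := by simpa [pvStep] using h2
    simp only [List.getElem_map, List.getElem_zip]
    have hstep : (pvStep s)[i] = (pvStep s).getD i 0 := by
      rw [List.getD_eq_getElem _ _ (by simpa [pvStep] using hi)]
    rw [hstep, pvStep_getD s i hi]
    have hA : ∀ (hh : i < (0 :: s.dropLast).length),
        (0 :: s.dropLast)[i]'hh = (if i = 0 then (0 : Int) else s.getD (i - 1) 0) := by
      intro hh
      cases i with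
      | zero => simp
      | succ j =>
        simp only [List.getElem_cons_succ, if_neg (Nat.succ_ne_zero j)]
        rw [List.getElem_dropLast, List.getD_eq_getElem _ _ (by omega)]
        simp
    have hB : ∀ (hh : i < (s.tail ++ [0]).length),
        (s.tail ++ [0])[i]'hh = s.getD (i + 1) 0 := by
      intro hh
      by_cases h3 : i < s.length - 1
      · rw [List.getElem_append_left (by simp; omega), List.getElem_tail,
          List.getD_eq_getElem _ _ (by omega)]
      · rw [List.getElem_append_right (by simp; omega)]
        rw [List.getD_eq_default _ _ (by omega)]
        simp
    have hC : s[i] = s.getD i 0 := by rw [List.getD_eq_getElem _ _ hi]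
    rw [hA, hB, hC]
    split_ifs <;> first | rfl | (exfalso; tauto)

theorem pvScan_length (N d : Int) (l : List Int) : (pvScan N d l).length = l.length := by
  induction l generalizing d with
  | nil => rfl
  | cons x xs ih => simp [pvScan, ih]

theorem pvDLarr_getD (s1 : List Int) (i : Nat) (hi : i < s1.length) :
    (pvScan ((s1.length : Int) + 1) ((s1.length : Int) + 1) s1).getD i 0 =
      (match pvDL s1 i with
       | some a => (a : Int)
       | none => (s1.length : Int) + 1) := by
  rw [pvScan_getD _ _ _ i (by positivity) hi (by omega)]
  unfold pvDL
  cases pvDF ((s1.take (i + 1)).reverse) with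
  | none =>
    simp only []
    rw [min_eq_right (by omega)]
  | some a => rfl

theorem pvRevTake (l : List Int) (i : Nat) (hi : i < l.length) :
    ((l.reverse.take (l.length - 1 - i + 1)).reverse) = l.drop i := by
  have h1 : l.length - 1 - i + 1 = l.length - i := by omega
  rw [h1, List.take_reverse]
  have h2 : l.length - (l.length - i) = i := by omega
  rw [h2]
  simp

theorem pvDRarr_getD (s1 : List Int) (i : Nat) (hi : i < s1.length) :
    ((pvScan ((s1.length : Int) + 1) ((s1.length : Int) + 1) s1.reverse).reverse).getD i 0 =
      (match pvDR s1 i with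
       | some b => (b : Int)
       | none => (s1.length : Int) + 1) := by
  have hlen : (pvScan ((s1.length : Int) + 1) ((s1.length : Int) + 1) s1.reverse).length = s1.length := by
    rw [pvScan_length, List.length_reverse]
  have h1 : i < ((pvScan ((s1.length : Int) + 1) ((s1.length : Int) + 1) s1.reverse).reverse).length := by
    rw [List.length_reverse, hlen]; exact hi
  rw [List.getD_eq_getElem _ _ h1, List.getElem_reverse]
  simp only [hlen]
  have h2 : s1.length - 1 - i < (pvScan ((s1.length : Int) + 1) ((s1.length : Int) + 1) s1.reverse).length := by
    rw [hlen]; omega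
  rw [← List.getD_eq_getElem _ (0 : Int) h2]
  rw [pvScan_getD _ _ _ _ (by positivity) (by rw [List.length_reverse]; omega) (by omega)]
  rw [pvRevTake s1 i hi]
  show (match pvDR s1 i with
       | some b => (b : Int)
       | none => min (((s1.length : Int) + 1) + ((s1.length - 1 - i : Nat) : Int) + 1) ((s1.length : Int) + 1)) = _
  cases pvDR s1 i with
  | none =>
    simp only []
    rw [min_eq_right (by omega)]
  | some b => rfl

theorem pvFoldl_scan (N : Int) (l : List Int) (acc : List Int) (d : Int) :
    (l.foldl (fun (acc : List Int × Int) x =>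
      (acc.1 ++ [if x = 1 then 0 else min (acc.2 + 1) N], if x = 1 then 0 else min (acc.2 + 1) N))
      (acc, d)).1 = acc ++ pvScan N d l := by
  induction l generalizing acc d with
  | nil => simp [pvScan]
  | cons x xs ih => simp [List.foldl_cons, pvScan, ih]

theorem pvFoldl_scan_rev (N : Int) (l : List Int) (acc : List Int) (d : Int) :
    (l.foldl (fun (acc : List Int × Int) x =>
      ((if x = 1 then 0 else min (acc.2 + 1) N) :: acc.1, if x = 1 then 0 else min (acc.2 + 1) N))
      (acc, d)).1 = (pvScan N d l).reverse ++ acc := by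
  induction l generalizing acc d with
  | nil => simp [pvScan]
  | cons x xs ih => simp [List.foldl_cons, pvScan, ih]

theorem pvFoldA (n0 : Int) (L : List Int) :
    ∀ s : List Int, n0 = (s.length : Int) →
    (L.foldl (fun s _ =>
      (PySem.List.pyRange 0 n0 1).map (fun i =>
        if PySem.List.pyGetD s i 0 = 1 then (1 : Int)
        else if ((if i > 0 then PySem.List.pyGetD s (i - 1) 0 else 0) +
                 (if i < n0 - 1 then PySem.List.pyGetD s (i + 1) 0 else 0)) = 1 then 1
        else 0)) s) = pvStep^[L.length] s := by
  induction L with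
  | nil => intro s h; rfl
  | cons x xs ih =>
    intro s h
    rw [List.foldl_cons, pvStepA_eq n0 s (by exact_mod_cast h),
      ih (pvStep s) (by rw [pvStep_length]; exact h)]
    rw [List.length_cons, Function.iterate_succ_apply]

theorem pvCond_iff (s1 : List Int) (i : Nat) (hi : i < s1.length) (t : Int) (ht : 0 ≤ t)
    (A B : Int)
    (hA : A = (match pvDL s1 i with
               | some a => (a : Int)
               | none => (s1.length : Int) + 1))
    (hB : B = (match pvDR s1 i with
               | some b => (b : Int)
               | none => (s1.length : Int) + 1)) :
    (s1.getD i 0 = 1 ∨ (min A B ≤ t ∧ A ≠ B)) ↔ pvOn s1 t.toNat i = true := by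
  cases hdl : pvDL s1 i with
  | none =>
    have hs : ¬ s1.getD i 0 = 1 := by
      intro h
      rw [(pvDL_eq_zero_iff s1 i hi).mpr h] at hdl; simp at hdl
    cases hdr : pvDR s1 i with
    | none =>
      have hA' : A = (s1.length : Int) + 1 := by rw [hA, hdl]
      have hB' : B = (s1.length : Int) + 1 := by rw [hB, hdr]
      simp only [hA', hB', pvOn, hdl, hdr]
      simp
      exact hs
    | some b =>
      have hA' : A = (s1.length : Int) + 1 := by rw [hA, hdl]
      have hB' : B = (b : Int) := by rw [hB, hdr]
      have hblt : i + b < s1.length := pvDR_lt s1 i hdr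
      simp only [hA', hB', pvOn, hdl, hdr, decide_eq_true_iff]
      constructor
      · rintro (h | ⟨h1, h2⟩)
        · exact absurd h hs
        · rw [min_eq_right (by omega)] at h1
          omega
      · intro h
        refine Or.inr ⟨?_, by omega⟩
        rw [min_eq_right (by omega)]
        omega
  | some a =>
    have ha_le : a ≤ i := pvDL_le s1 i hdl
    cases hdr : pvDR s1 i with
    | none =>
      have hs : ¬ s1.getD i 0 = 1 := by
        intro h
        rw [(pvDR_eq_zero_iff s1 i hi).mpr h] at hdr; simp at hdr
      have hA' : A = (a : Int) := by rw [hA, hdl]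
      have hB' : B = (s1.length : Int) + 1 := by rw [hB, hdr]
      simp only [hA', hB', pvOn, hdl, hdr, decide_eq_true_iff]
      constructor
      · rintro (h | ⟨h1, h2⟩)
        · exact absurd h hs
        · rw [min_eq_left (by omega)] at h1
          omega
      · intro h
        refine Or.inr ⟨?_, by omega⟩
        rw [min_eq_left (by omega)]
        omega
    | some b =>
      have hblt : i + b < s1.length := pvDR_lt s1 i hdr
      have hs : s1.getD i 0 = 1 ↔ a = 0 := by
        constructor
        · intro h
          have := (pvDL_eq_zero_iff s1 i hi).mpr h
          rw [hdl] at this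
          exact Option.some.inj this
        · intro h
          exact (pvDL_eq_zero_iff s1 i hi).mp (by rw [hdl, h])
      have hA' : A = (a : Int) := by rw [hA, hdl]
      have hB' : B = (b : Int) := by rw [hB, hdr]
      simp only [hA', hB', pvOn, hdl, hdr, decide_eq_true_iff]
      rw [hs]
      constructor
      · rintro (h | ⟨h1, h2⟩)
        · exact Or.inl h
        · refine Or.inr ⟨by omega, ?_⟩
          rcases le_total a b with hab | hab
          · rw [min_eq_left (by omega)] at h1
            rw [min_eq_left hab]
            omega
          · rw [min_eq_right (by omega)] at h1
            rw [min_eq_right hab]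
            omega
      · rintro (h | ⟨h1, h2⟩)
        · exact Or.inl h
        · refine Or.inr ⟨?_, by omega⟩
          rcases le_total a b with hab | hab
          · rw [min_eq_left (by exact_mod_cast hab)]
            rw [min_eq_left hab] at h2
            omega
          · rw [min_eq_right (by exact_mod_cast hab)]
            rw [min_eq_right hab] at h2
            omega

theorem pvOut_index (s1 : List Int) (m : Int) (hm : 0 < m) (i : Nat) (hi : i < s1.length)
    (hb : ∀ x ∈ s1, x = 0 ∨ x = 1) :
    (if s1.getD i 0 = 1 ∨
        (min ((pvScan ((s1.length : Int) + 1) ((s1.length : Int) + 1) s1).getD i 0)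
           (((pvScan ((s1.length : Int) + 1) ((s1.length : Int) + 1) s1.reverse).reverse).getD i 0) ≤ m - 1 ∧
         (pvScan ((s1.length : Int) + 1) ((s1.length : Int) + 1) s1).getD i 0 ≠
           ((pvScan ((s1.length : Int) + 1) ((s1.length : Int) + 1) s1.reverse).reverse).getD i 0)
     then ("1" : String) else "0")
    = PySem.Int.toStr ((pvStep^[(m - 1).toNat] s1).getD i 0) := by
  rw [pvIter_getD (m - 1).toNat s1 hb i hi]
  have hiff := pvCond_iff s1 i hi (m - 1) (by omega) _ _ (pvDLarr_getD s1 i hi) (pvDRarr_getD s1 i hi)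
  cases hP : pvOn s1 (m - 1).toNat i with
  | true =>
    rw [if_pos (hiff.mpr hP), if_pos rfl]
    rfl
  | false =>
    rw [if_neg (fun hc => by rw [hiff.mp hc] at hP; exact Bool.noConfusion hP)]
    rw [if_neg Bool.false_ne_true]
    rfl

theorem pvA_eq (soldiers : List Int) (m : Int) :
    evolve_soldiers soldiers m =
      PySem.Str.join "" ((pvStep^[m.toNat] soldiers).map PySem.Int.toStr) := by
  simp only [evolve_soldiers]
  rw [pvFoldA (soldiers.length : Int) (PySem.List.pyRange 0 m 1) soldiers rfl]
  rw [PySem.List.length_pyRange_one]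
  rw [Int.sub_zero]

-- ===== VERDICT (by name: the statement is the Claim_ definition above) =====
theorem evolve_soldiers_spec : Claim_equal_evolve_soldiers := by
  intro soldiers m _
  unfold Spec_evolve_soldiers
  rw [pvA_eq]
  by_cases hm : m ≤ 0
  · have h0 : m.toNat = 0 := by omega
    rw [h0]
    simp only [evolve_soldiers_alt, if_pos hm]
    rfl
  · simp only [evolve_soldiers_alt, if_neg hm]
    rw [pvS1_eq soldiers]
    rw [pvFoldl_scan, pvFoldl_scan_rev, List.nil_append, List.append_nil]
    have hmt : m.toNat = (m - 1).toNat + 1 := by omega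
    rw [hmt, Function.iterate_succ_apply]
    generalize hs1 : pvStep soldiers = s1
    have hn : (soldiers.length : Int) = (s1.length : Int) := by rw [← hs1, pvStep_length]
    rw [hn]
    have hb : ∀ x ∈ s1, x = 0 ∨ x = 1 := by rw [← hs1]; exact pvStep_binary soldiers
    apply congrArg (PySem.Str.join "")
    apply List.ext_getElem
    · simp [List.length_zip, pvScan_length, pvIter_length]
    · intro i h1 h2
      have hi : i < s1.length := by
        rw [List.length_map, pvIter_length] at h1
        exact h1
      simp only [List.getElem_map, List.getElem_zip]
      rw [← List.getD_eq_getElem (pvStep^[(m - 1).toNat] s1) 0 (by rw [pvIter_length]; exact hi)]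
      rw [← List.getD_eq_getElem s1 0 hi]
      rw [← List.getD_eq_getElem (pvScan ((s1.length : Int) + 1) ((s1.length : Int) + 1) s1) 0
        (by rw [pvScan_length]; exact hi)]
      rw [← List.getD_eq_getElem
        ((pvScan ((s1.length : Int) + 1) ((s1.length : Int) + 1) s1.reverse).reverse) 0
        (by rw [List.length_reverse, pvScan_length, List.length_reverse]; exact hi)]
      exact (pvOut_index s1 m (by omega) i hi hb).symm
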